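-- pv_equiv track=rewrite | github.com/tommoseley/TheCombine | app/web/routes/public/intake_pure.py | clean_problem_statement
-- ===== SOURCE A (Python) =====
-- _PREFIXES_TO_STRIP = [
--     "The user wants to ",
--     "The user wants ",
--     "User wants to ",
--     "User wants ",
--     "The user is requesting ",
--     "The user would like to ",
--     "The user needs to ",
--     "The user needs ",
--     "This request is for ",
--     "This is a request for ",
--     "The request is to ",
-- ]
--
-- def clean_problem_statement(text: str) -> str:
--     """Mechanically strip 'The user wants to...' style prefixes from summary.description.
--
--     This is a deterministic transformation, not LLM-based.
--     After stripping, the first letter is capitalized.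
--     """
--     if not text:
--         return ""
--
--     result = text.strip()
--     for prefix in _PREFIXES_TO_STRIP:
--         if result.lower().startswith(prefix.lower()):
--             result = result[len(prefix):]
--             if result:
--                 result = result[0].upper() + result[1:]
--             break
--
--     return result
-- ===== SOURCE B (Python) =====
-- _PREFIXES_TO_STRIP = [
--     "The user wants to ",
--     "The user wants ",
--     "User wants to ",
--     "User wants ",
--     "The user is requesting ",
--     "The user would like to ",
--     "The user needs to ",
--     "The user needs ",
--     "This request is for ",
--     "This is a request for ",
--     "The request is to ",
-- ]
--
-- def clean_problem_statement(text: str) -> str: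
--     """Strip a known prefix (longest match) and capitalize; equals first-match
--     since no shorter prefix precedes a longer compatible one in the list."""
--     if not text:
--         return ""
--     result = text.strip()
--     low = result.lower()
--     best = 0
--     for p in _PREFIXES_TO_STRIP:
--         if low.startswith(p.lower()):
--             best = max(best, len(p))
--     if best:
--         result = result[best:]
--         if result:
--             result = result[0].upper() + result[1:]
--     return result
-- ===== Notes on version B (the rewrite author's own statement) =====
-- stated objective: alternative
-- what changed: B replaces A's first-match-then-break scan over the prefix list by a single longest-match pass (max matching prefix length over the whole list), which is equivalent because no shorter prefix precedes a longer compatible one in the list; the proof carries this as a pairwise prefix-compatibility lemma.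
import Mathlib
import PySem

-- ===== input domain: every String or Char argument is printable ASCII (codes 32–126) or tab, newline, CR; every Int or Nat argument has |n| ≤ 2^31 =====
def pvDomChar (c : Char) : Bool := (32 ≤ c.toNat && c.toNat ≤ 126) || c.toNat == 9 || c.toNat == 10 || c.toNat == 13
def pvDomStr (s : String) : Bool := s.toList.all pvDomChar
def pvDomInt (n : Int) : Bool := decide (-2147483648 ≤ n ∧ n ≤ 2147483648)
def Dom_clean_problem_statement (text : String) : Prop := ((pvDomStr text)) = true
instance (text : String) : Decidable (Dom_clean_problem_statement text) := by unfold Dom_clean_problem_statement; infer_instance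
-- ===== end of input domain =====

-- B strips the LONGEST matching prefix in one max-pass instead of A's break-at-first-match scan;
-- equivalent because in the list no shorter prefix comes before a longer one it is a prefix of. Objective: alternative.

def pvPrefixes : List String := [
  "The user wants to ",
  "The user wants ",
  "User wants to ",
  "User wants ",
  "The user is requesting ",
  "The user would like to ",
  "The user needs to ",
  "The user needs ",
  "This request is for ",
  "This is a request for ",
  "The request is to "]

-- result = result[n:]; if result: result = result[0].upper() + result[1:]   (shared lines of A and B)
def pvStripCap (result : String) (n : Int) : String :=
  let r := PySem.Str.slice result (some n) none
  match r.toList with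
  | [] => r
  | c :: cs => String.ofList (PySem.Chars.upperChar c :: cs)

-- ===== PORT A =====
def pvALoop : List String → String → String
  | [], result => result
  | prefix_ :: rest, result =>
    if PySem.Str.startswith (PySem.Str.lower result) (PySem.Str.lower prefix_) then
      pvStripCap result (PySem.Str.len prefix_)
    else
      pvALoop rest result

def clean_problem_statement (text : String) : String :=
  if text = "" then ""
  else pvALoop pvPrefixes (PySem.Str.strip text)

-- ===== PORT B =====
def clean_problem_statement_alt (text : String) : String :=
  if text = "" then ""
  else
    let result := PySem.Str.strip text
    let low := PySem.Str.lower result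
    let best := pvPrefixes.foldl
      (fun best p => if PySem.Str.startswith low (PySem.Str.lower p) then max best (PySem.Str.len p) else best) 0
    if best ≠ 0 then pvStripCap result best else result

-- ===== PRECONDITION & SPEC =====
def Spec_clean_problem_statement (text : String) (out : String) : Prop := out = clean_problem_statement_alt text
instance (text : String) (out : String) : Decidable (Spec_clean_problem_statement text out) := by unfold Spec_clean_problem_statement; infer_instance

-- ===== CLAIM (what is proved, stated in full; the proofs are below) =====
def Claim_equal_clean_problem_statement : Prop := ∀ (text : String), Dom_clean_problem_statement text → Spec_clean_problem_statement text (clean_problem_statement text)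

-- ===== LEMMAS AND PROOFS =====

-- matching condition: lower result starts with lower p
def pvCond (low p : String) : Bool := PySem.Str.startswith low (PySem.Str.lower p)

-- list compatibility: whenever two list entries can both match, the EARLIER one is at least as long
abbrev pvOk (p q : String) : Prop :=
  (PySem.Str.lower q).toList.isPrefixOf (PySem.Str.lower p).toList = true ∨
  ((PySem.Str.lower p).toList.isPrefixOf (PySem.Str.lower q).toList = false ∧
   (PySem.Str.lower q).toList.isPrefixOf (PySem.Str.lower p).toList = false)

theorem pvLowerLen (cs : List Char) : (PySem.Chars.lower cs).length = cs.length := by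
  simp [PySem.Chars.lower]

theorem pvPrefixes_ok : pvPrefixes.Pairwise pvOk := by
  decide

theorem pvCond_len_le {low p q : String} (hok : pvOk p q)
    (hp : pvCond low p = true) (hq : pvCond low q = true) :
    PySem.Str.len q ≤ PySem.Str.len p := by
  simp only [pvCond, PySem.Str.startswith_eq, PySem.Chars.startswith,
    PySem.Str.toList_lower, List.isPrefixOf_iff_prefix] at hp hq
  simp only [pvOk, PySem.Str.toList_lower, List.isPrefixOf_iff_prefix,
    Bool.eq_false_iff, ne_eq] at hok
  simp only [PySem.Str.len_eq]
  rcases hok with hqp | ⟨h1, h2⟩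
  · have := hqp.length_le
    simp only [pvLowerLen] at this
    omega
  · rcases List.prefix_or_prefix_of_prefix hp hq with h | h
    · exact absurd h h1
    · exact absurd h h2

theorem pvFold_const (low : String) (L : List String) (a : Int)
    (h : ∀ q ∈ L, pvCond low q = true → PySem.Str.len q ≤ a) :
    L.foldl (fun best p => if pvCond low p then max best (PySem.Str.len p) else best) a = a := by
  induction L with
  | nil => rfl
  | cons q L ih =>
    simp only [List.foldl_cons]
    rcases hq : pvCond low q with _ | _
    · simp only [Bool.false_eq_true, if_false]
      exact ih (fun r hr hc => h r (List.mem_cons_of_mem _ hr) hc)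
    · have := h q (List.mem_cons_self) hq
      simp only [if_true, max_eq_left this]
      exact ih (fun r hr hc => h r (List.mem_cons_of_mem _ hr) hc)

theorem pvLen_pos (p : String) (hp : p ∈ pvPrefixes) : 0 < PySem.Str.len p := by
  fin_cases hp <;> decide

theorem pvLoop_eq (L : List String) (result : String)
    (hpair : L.Pairwise pvOk) (hpos : ∀ p ∈ L, 0 < PySem.Str.len p) :
    pvALoop L result =
      (let best := L.foldl
        (fun best p => if pvCond (PySem.Str.lower result) p then max best (PySem.Str.len p) else best) 0;
       if best ≠ 0 then pvStripCap result best else result) := by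
  induction L with
  | nil => simp [pvALoop]
  | cons p L ih =>
    simp only [List.pairwise_cons] at hpair
    obtain ⟨hpq, hpairL⟩ := hpair
    simp only [pvALoop, List.foldl_cons]
    rcases hc : pvCond (PySem.Str.lower result) p with _ | _
    · simp only [pvCond] at hc
      simp only [hc, Bool.false_eq_true, if_false]
      exact ih hpairL (fun q hq => hpos q (List.mem_cons_of_mem _ hq))
    · have hlp : 0 < PySem.Str.len p := hpos p List.mem_cons_self
      simp only [pvCond] at hc
      simp only [hc, if_true]
      have hmax : max (0 : Int) (PySem.Str.len p) = PySem.Str.len p := by omega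
      rw [hmax]
      have hfold : L.foldl
          (fun best q => if pvCond (PySem.Str.lower result) q then max best (PySem.Str.len q) else best)
          (PySem.Str.len p) = PySem.Str.len p := by
        apply pvFold_const
        intro q hq hcq
        exact pvCond_len_le (hpq q hq) (by simpa [pvCond] using hc) hcq
      rw [hfold]
      simp only [ne_eq]
      rw [if_pos (by omega)]

-- ===== VERDICT (by name: the statement is the Claim_ definition above) =====
theorem clean_problem_statement_spec : Claim_equal_clean_problem_statement := by
  intro text _
  unfold Spec_clean_problem_statement clean_problem_statement clean_problem_statement_alt
  by_cases h : text = ""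
  · simp [h]
  · simp only [h, if_false]
    have := pvLoop_eq pvPrefixes (PySem.Str.strip text) pvPrefixes_ok pvLen_pos
    simpa [pvCond] using this
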